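-- pv_equiv track=rewrite | github.com/sethladd/mtg-set-designer-skill | mtg-color-pie-reviewer/scripts/color_pie_review.py | _effect_covered_by_partner
-- ===== SOURCE A (Python) =====
-- def _effect_covered_by_partner(pattern: str, explanation: str, partner_colors: list[str]) -> bool:
--     """Check if a flagged effect is in-pie for at least one partner color in a multicolor card."""
--     # Mapping: which colors naturally provide which flagged effects
--     effect_providers = {
--         "destroy": {"B", "W"},  # Black/white destroy creatures
--         "exile": {"W"},  # White exiles
--         "enchantment": {"W", "G"},  # White/green handle enchantments
--         "artifact": {"R", "G", "W"},  # Red/green/white handle artifacts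
--         "counter": {"U"},  # Blue counters
--         "life": {"W", "G", "B"},  # White/green/black gain life
--         "lifelink": {"W", "B"},  # White/black get lifelink
--         "damage": {"R"},  # Red deals damage
--         "draw": {"U", "B"},  # Blue/black draw cards
--     }
--
--     for keyword, providers in effect_providers.items():
--         if keyword in explanation.lower():
--             if any(c in providers for c in partner_colors):
--                 return True
--     return False
-- ===== SOURCE B (Python) =====
-- # Inverted index: color -> keywords it provides; iterate colors outer, keywords inner.
-- _COLOR_EFFECTS = {
--     "W": ("destroy", "exile", "enchantment", "artifact", "life", "lifelink"),
--     "U": ("counter", "draw"),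
--     "B": ("destroy", "life", "lifelink", "draw"),
--     "R": ("artifact", "damage"),
--     "G": ("enchantment", "artifact", "life"),
-- }
--
-- def _effect_covered_by_partner(pattern: str, explanation: str, partner_colors: list[str]) -> bool:
--     text = explanation.lower()
--     for c in partner_colors:
--         for kw in _COLOR_EFFECTS.get(c, ()):
--             if kw in text:
--                 return True
--     return False
-- ===== Notes on version B (the rewrite author's own statement) =====
-- stated objective: alternative
-- what changed: Replaces the keyword-outer scan over the effect->providers dict (with an inner any over partner colors) by a precomputed inverted color->keywords index iterated with partner colors as the outer loop and substring tests inner, returning on the first hit.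
import Mathlib
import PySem

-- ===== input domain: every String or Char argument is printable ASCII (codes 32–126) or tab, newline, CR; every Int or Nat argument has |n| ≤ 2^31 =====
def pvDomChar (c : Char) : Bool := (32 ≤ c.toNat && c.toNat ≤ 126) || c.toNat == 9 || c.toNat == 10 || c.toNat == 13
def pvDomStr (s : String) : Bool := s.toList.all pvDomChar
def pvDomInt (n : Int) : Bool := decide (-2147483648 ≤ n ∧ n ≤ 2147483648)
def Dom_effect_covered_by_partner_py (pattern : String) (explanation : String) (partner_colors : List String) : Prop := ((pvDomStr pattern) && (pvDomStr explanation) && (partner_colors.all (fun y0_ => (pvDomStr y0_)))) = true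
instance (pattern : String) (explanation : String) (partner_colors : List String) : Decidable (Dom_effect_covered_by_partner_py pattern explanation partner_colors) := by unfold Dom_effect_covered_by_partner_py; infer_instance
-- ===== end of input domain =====

-- B replaces A's keyword-outer scan (inner any over partner colors) by a precomputed
-- inverted color->keywords index scanned colors-outer, keywords-inner; same results, similar cost.

-- ===== PORT A =====
-- effect_providers: dict keyword -> set of colors (set ported as list of distinct elements)
def pvEffectProviders : List (String × PySem.Set String) :=
  [("destroy", ["B", "W"]), ("exile", ["W"]), ("enchantment", ["W", "G"]),
   ("artifact", ["R", "G", "W"]), ("counter", ["U"]), ("life", ["W", "G", "B"]),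
   ("lifelink", ["W", "B"]), ("damage", ["R"]), ("draw", ["U", "B"])]

-- the 'for keyword, providers in …' loop with early return
def pvLoopA (expl : String) (partner_colors : List String) : List (String × PySem.Set String) → Bool
  | [] => false
  | (kw, provs) :: rest =>
    if PySem.Str.isIn kw (PySem.Str.lower expl) then
      if partner_colors.any (fun c => PySem.Set.contains provs c) then true
      else pvLoopA expl partner_colors rest
    else pvLoopA expl partner_colors rest

def effect_covered_by_partner_py (pattern : String) (explanation : String) (partner_colors : List String) : Bool :=
  pvLoopA explanation partner_colors pvEffectProviders

-- ===== PORT B =====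
-- inverted index: color -> keywords it provides
def pvColorEffects : PySem.Dict String (List String) :=
  PySem.Dict.mk
    [("W", ["destroy", "exile", "enchantment", "artifact", "life", "lifelink"]),
     ("U", ["counter", "draw"]),
     ("B", ["destroy", "life", "lifelink", "draw"]),
     ("R", ["artifact", "damage"]),
     ("G", ["enchantment", "artifact", "life"])]

-- inner 'for kw in …: if kw in text: return True'
def pvAnyKw (text : String) : List String → Bool
  | [] => false
  | kw :: rest => if PySem.Str.isIn kw text then true else pvAnyKw text rest

-- outer 'for c in partner_colors'
def pvLoopB (text : String) : List String → Bool
  | [] => false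
  | c :: rest =>
    if pvAnyKw text (PySem.Dict.getD pvColorEffects c []) then true else pvLoopB text rest

def effect_covered_by_partner_py_alt (pattern : String) (explanation : String) (partner_colors : List String) : Bool :=
  pvLoopB (PySem.Str.lower explanation) partner_colors

-- ===== PRECONDITION & SPEC =====
def Spec_effect_covered_by_partner_py (pattern : String) (explanation : String) (partner_colors : List String) (out : Bool) : Prop := out = effect_covered_by_partner_py_alt pattern explanation partner_colors
instance (pattern : String) (explanation : String) (partner_colors : List String) (out : Bool) : Decidable (Spec_effect_covered_by_partner_py pattern explanation partner_colors out) := by unfold Spec_effect_covered_by_partner_py; infer_instance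

-- ===== CLAIM (what is proved, stated in full; the proofs are below) =====
def Claim_equal_effect_covered_by_partner_py : Prop := ∀ (pattern : String) (explanation : String) (partner_colors : List String), Dom_effect_covered_by_partner_py pattern explanation partner_colors → Spec_effect_covered_by_partner_py pattern explanation partner_colors (effect_covered_by_partner_py pattern explanation partner_colors)

-- ===== LEMMAS AND PROOFS =====

lemma pvLoopA_eq_any (expl : String) (pcs : List String) (items : List (String × PySem.Set String)) :
    pvLoopA expl pcs items
      = items.any (fun p => PySem.Str.isIn p.1 (PySem.Str.lower expl)
          && pcs.any (fun c => PySem.Set.contains p.2 c)) := by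
  induction items with
  | nil => rfl
  | cons p rest ih =>
    obtain ⟨kw, provs⟩ := p
    simp only [pvLoopA, List.any_cons, ih]
    by_cases h1 : PySem.Str.isIn kw (PySem.Str.lower expl) <;>
      by_cases h2 : pcs.any (fun c => PySem.Set.contains provs c) <;>
      simp_all [List.any_eq]

lemma pvLoopB_eq_any (text : String) (cs : List String) :
    pvLoopB text cs = cs.any (fun c => pvAnyKw text (PySem.Dict.getD pvColorEffects c [])) := by
  induction cs with
  | nil => rfl
  | cons c rest ih =>
    simp only [pvLoopB, List.any_cons, ih]
    by_cases h : pvAnyKw text (PySem.Dict.getD pvColorEffects c []) <;> simp [h]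

-- per-color key fact: A's row scan for a fixed color equals B's indexed keyword list
lemma pvKey (t : String) (c : String) :
    pvEffectProviders.any (fun p => PySem.Str.isIn p.1 t && PySem.Set.contains p.2 c)
      = pvAnyKw t (PySem.Dict.getD pvColorEffects c []) := by
  by_cases hW : c = "W"
  · subst hW
    rw [(by decide : PySem.Dict.getD pvColorEffects "W" []
          = ["destroy", "exile", "enchantment", "artifact", "life", "lifelink"])]
    simp [pvEffectProviders, pvAnyKw, Bool.if_true_left]
  by_cases hU : c = "U"
  · subst hU
    rw [(by decide : PySem.Dict.getD pvColorEffects "U" [] = ["counter", "draw"])]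
    simp [pvEffectProviders, pvAnyKw, Bool.if_true_left]
  by_cases hB : c = "B"
  · subst hB
    rw [(by decide : PySem.Dict.getD pvColorEffects "B" []
          = ["destroy", "life", "lifelink", "draw"])]
    simp [pvEffectProviders, pvAnyKw, Bool.if_true_left]
  by_cases hR : c = "R"
  · subst hR
    rw [(by decide : PySem.Dict.getD pvColorEffects "R" [] = ["artifact", "damage"])]
    simp [pvEffectProviders, pvAnyKw, Bool.if_true_left]
  by_cases hG : c = "G"
  · subst hG
    rw [(by decide : PySem.Dict.getD pvColorEffects "G" []
          = ["enchantment", "artifact", "life"])]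
    simp [pvEffectProviders, pvAnyKw, Bool.if_true_left]
  · have eW : ("W" == c) = false := beq_eq_false_iff_ne.mpr (Ne.symm hW)
    have eU : ("U" == c) = false := beq_eq_false_iff_ne.mpr (Ne.symm hU)
    have eB : ("B" == c) = false := beq_eq_false_iff_ne.mpr (Ne.symm hB)
    have eR : ("R" == c) = false := beq_eq_false_iff_ne.mpr (Ne.symm hR)
    have eG : ("G" == c) = false := beq_eq_false_iff_ne.mpr (Ne.symm hG)
    simp [pvEffectProviders, pvColorEffects, pvAnyKw, PySem.Dict.getD, List.find?,
      PySem.Dict.get?, PySem.Set.contains, hW, hU, hB, hR, hG, eW, eU, eB, eR, eG]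

-- ===== VERDICT (by name: the statement is the Claim_ definition above) =====
theorem effect_covered_by_partner_py_spec : Claim_equal_effect_covered_by_partner_py := by
  intro pattern explanation partner_colors _
  show effect_covered_by_partner_py pattern explanation partner_colors
      = effect_covered_by_partner_py_alt pattern explanation partner_colors
  unfold effect_covered_by_partner_py effect_covered_by_partner_py_alt
  rw [pvLoopA_eq_any, pvLoopB_eq_any]
  rw [Bool.eq_iff_iff]
  simp only [List.any_eq_true, Bool.and_eq_true, ← pvKey]
  constructor
  · rintro ⟨p, hp, h1, c, hc, h2⟩
    exact ⟨c, hc, p, hp, h1, h2⟩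
  · rintro ⟨c, hc, p, hp, h1, h2⟩
    exact ⟨p, hp, h1, c, hc, h2⟩
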